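-- pv_equiv track=rewrite | github.com/DefinedBehavior/chaos-rando | src/commands.py | find_implicit_command
-- ===== SOURCE A (Python) =====
-- def find_implicit_command(amount, commands_config):
-- 	highest_price = 0
-- 	best_command_name = None
-- 	for k, v in commands_config.items():
-- 		if highest_price < v['cost'] and not v['explicit'] and v['cost'] <= amount:
-- 			highest_price = v['cost']
-- 			best_command_name = k
-- 	return best_command_name
-- ===== SOURCE B (Python) =====
-- def find_implicit_command(amount, commands_config):
-- 	ranked = sorted(((k, v['cost']) for k, v in commands_config.items()
-- 	                 if not v['explicit'] and 0 < v['cost'] <= amount),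
-- 	                key=lambda kc: -kc[1])
-- 	return ranked[0][0] if ranked else None
-- ===== Notes on version B (the rewrite author's own statement) =====
-- stated objective: alternative
-- what changed: A's single stateful best-so-far scan is replaced by a staged sort-then-pick: collect eligible (name, cost) pairs, stably sort them by descending cost (key=-cost), and return the head; stability of Python's sort reproduces A's first-tie-wins behaviour.
-- outside the precondition, e.g. on find_implicit_command(1, {'cost': {'cost': 0}}): A returns None, B raises KeyError
import Mathlib
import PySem

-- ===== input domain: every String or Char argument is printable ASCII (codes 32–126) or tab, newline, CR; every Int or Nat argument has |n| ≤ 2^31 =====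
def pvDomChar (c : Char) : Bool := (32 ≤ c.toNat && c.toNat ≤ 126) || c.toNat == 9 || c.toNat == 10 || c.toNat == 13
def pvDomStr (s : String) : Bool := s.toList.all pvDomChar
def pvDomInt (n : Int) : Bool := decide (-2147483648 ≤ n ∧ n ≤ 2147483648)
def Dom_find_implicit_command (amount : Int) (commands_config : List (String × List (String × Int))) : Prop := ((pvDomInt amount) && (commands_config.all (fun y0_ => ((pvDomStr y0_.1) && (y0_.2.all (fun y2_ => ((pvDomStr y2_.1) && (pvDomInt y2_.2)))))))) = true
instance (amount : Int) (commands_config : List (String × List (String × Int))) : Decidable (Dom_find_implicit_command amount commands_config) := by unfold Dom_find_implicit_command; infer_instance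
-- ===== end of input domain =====

-- ===== PORT A =====
-- B replaces A's single best-so-far scan by filter, stable sort by descending cost, take head (alternative decomposition).
-- Shared helper: v['cost'] / v['explicit'] on the inner dict (total form of the lookup;
-- Pre_ guarantees the key is present, exactly where Python's d[k] would not raise KeyError).
def pvCost (v : List (String × Int)) : Int := (PySem.Dict.mk v).getD "cost" 0
def pvExpl (v : List (String × Int)) : Int := (PySem.Dict.mk v).getD "explicit" 0

def find_implicit_command (amount : Int) (commands_config : List (String × List (String × Int))) : Option String :=
  (commands_config.foldl
    (fun (s : Int × Option String) kv =>
      if s.1 < pvCost kv.2 ∧ pvExpl kv.2 = 0 ∧ pvCost kv.2 ≤ amount then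
        (pvCost kv.2, some kv.1)
      else s)
    (0, none)).2

-- ===== PORT B =====
def find_implicit_command_alt (amount : Int) (commands_config : List (String × List (String × Int))) : Option String :=
  let ranked :=
    PySem.List.sorted
      ((commands_config.filter
          (fun kv => decide (pvExpl kv.2 = 0 ∧ 0 < pvCost kv.2 ∧ pvCost kv.2 ≤ amount))).map
        (fun kv => (kv.1, pvCost kv.2)))
      (fun kc => -kc.2) false
  match ranked with
  | [] => none
  | p :: _ => some p.1

-- ===== PRECONDITION & SPEC =====
-- Pre_ excludes inner dicts missing a 'cost' or 'explicit' key — A and B short-circuit their conditions in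
-- different orders, so on such inputs each program may raise KeyError where the other returns — and
-- association lists with duplicate keys (outer or inner), on which the Python dict built from the list
-- collapses entries and the assoc-list representation does not denote the dict A and B see.
def Pre_find_implicit_command (amount : Int) (commands_config : List (String × List (String × Int))) : Prop :=
  (commands_config.map Prod.fst).Nodup ∧
  ∀ kv ∈ commands_config,
    (kv.2.map Prod.fst).Nodup ∧ "cost" ∈ kv.2.map Prod.fst ∧ "explicit" ∈ kv.2.map Prod.fst
instance (amount : Int) (commands_config : List (String × List (String × Int))) : Decidable (Pre_find_implicit_command amount commands_config) := by unfold Pre_find_implicit_command; infer_instance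

def pvWitness_find_implicit_command : Int × (List (String × List (String × Int))) :=
  (5, [("a", [("cost", 3), ("explicit", 0)]), ("b", [("cost", 4), ("explicit", 1)])])

def Spec_find_implicit_command (amount : Int) (commands_config : List (String × List (String × Int))) (out : Option String) : Prop := out = find_implicit_command_alt amount commands_config
instance (amount : Int) (commands_config : List (String × List (String × Int))) (out : Option String) : Decidable (Spec_find_implicit_command amount commands_config out) := by unfold Spec_find_implicit_command; infer_instance

-- ===== CLAIM (what is proved, stated in full; the proofs are below) =====
def Claim_equal_find_implicit_command : Prop := ∀ (amount : Int) (commands_config : List (String × List (String × Int))), Dom_find_implicit_command amount commands_config → Pre_find_implicit_command amount commands_config → Spec_find_implicit_command amount commands_config (find_implicit_command amount commands_config)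

-- ===== LEMMAS AND PROOFS =====

-- First-maximum step: the effect one candidate has on the head of the sorted accumulator.
def pvStepM (acc : Option (String × Int)) (x : String × Int) : Option (String × Int) :=
  match acc with
  | none => some x
  | some m => if m.2 < x.2 then some x else some m

-- Relation between A's accumulator (highest_price, best_command_name) and the first-maximum of
-- the candidates processed so far.
def pvRel (s : Int × Option String) (m : Option (String × Int)) : Prop :=
  (m = none ∧ s = (0, none)) ∨ (∃ k c, m = some (k, c) ∧ s = (c, some k) ∧ 0 < c)

-- Loop invariant: running A's loop on l from state s, and the first-maximum fold on B's
-- candidates of l from m, preserves pvRel.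
lemma pvLoop_inv (amount : Int) (l : List (String × List (String × Int)))
    (s : Int × Option String) (m : Option (String × Int)) (h : pvRel s m) :
    pvRel
      (l.foldl
        (fun (s : Int × Option String) kv =>
          if s.1 < pvCost kv.2 ∧ pvExpl kv.2 = 0 ∧ pvCost kv.2 ≤ amount then
            (pvCost kv.2, some kv.1)
          else s) s)
      (((l.filter
          (fun kv => decide (pvExpl kv.2 = 0 ∧ 0 < pvCost kv.2 ∧ pvCost kv.2 ≤ amount))).map
          (fun kv => (kv.1, pvCost kv.2))).foldl pvStepM m) := by
  induction l generalizing s m with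
  | nil => exact h
  | cons kv t ih =>
    by_cases hq : pvExpl kv.2 = 0 ∧ 0 < pvCost kv.2 ∧ pvCost kv.2 ≤ amount
    · have hq' : decide (pvExpl kv.2 = 0 ∧ 0 < pvCost kv.2 ∧ pvCost kv.2 ≤ amount) = true := by
        simpa using hq
      simp only [List.filter_cons, hq', if_true, List.map_cons, List.foldl_cons]
      apply ih
      obtain ⟨he, hcpos, hca⟩ := hq
      rcases h with ⟨hm, hs⟩ | ⟨k, c, hm, hs, hc⟩
      · subst hm; subst hs
        rw [if_pos ⟨hcpos, he, hca⟩]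
        exact Or.inr ⟨kv.1, pvCost kv.2, by simp [pvStepM], rfl, hcpos⟩
      · subst hm; subst hs
        by_cases hlt : c < pvCost kv.2
        · rw [if_pos ⟨hlt, he, hca⟩]
          exact Or.inr ⟨kv.1, pvCost kv.2, by simp [pvStepM, hlt], rfl, hcpos⟩
        · rw [if_neg (fun hcon => hlt hcon.1)]
          exact Or.inr ⟨k, c, by simp [pvStepM, hlt], rfl, hc⟩
    · have hq' : decide (pvExpl kv.2 = 0 ∧ 0 < pvCost kv.2 ∧ pvCost kv.2 ≤ amount) = false := by
        simpa using hq
      simp only [List.filter_cons, hq', List.foldl_cons]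
      apply ih
      have hskip : ¬ (s.1 < pvCost kv.2 ∧ pvExpl kv.2 = 0 ∧ pvCost kv.2 ≤ amount) := by
        have hnn : 0 ≤ s.1 := by
          rcases h with ⟨_, hs⟩ | ⟨k, c, _, hs, hc⟩ <;> subst hs
          · exact le_refl 0
          · exact le_of_lt hc
        intro hcon
        exact hq ⟨hcon.2.1, lt_of_le_of_lt hnn hcon.1, hcon.2.2⟩
      rw [if_neg hskip]
      exact h

-- Head of a stable insertion: inserting x by 'key x < key y' (key = -cost) changes the head exactly
-- as pvStepM changes the running first-maximum.
lemma head_insertBy (x : String × Int) (ys : List (String × Int)) :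
    (PySem.List.insertBy (fun a b : String × Int => decide (-a.2 < -b.2)) x ys).head? =
      pvStepM ys.head? x := by
  cases ys with
  | nil => simp [PySem.List.insertBy, pvStepM]
  | cons y t =>
    by_cases hlt : y.2 < x.2
    · simp [PySem.List.insertBy, pvStepM, hlt, show (-x.2 < -y.2) from by omega]
    · simp [PySem.List.insertBy, pvStepM, hlt, show ¬(-x.2 < -y.2) from by omega]

-- Head of the insertion-sort fold = first-maximum fold of the heads.
lemma head_foldl_insertBy (l : List (String × Int)) (acc : List (String × Int)) :
    (l.foldl
        (fun acc x => PySem.List.insertBy (fun a b : String × Int => decide (-a.2 < -b.2)) x acc)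
        acc).head? =
      l.foldl pvStepM acc.head? := by
  induction l generalizing acc with
  | nil => rfl
  | cons x t ih => simp only [List.foldl_cons, ih, head_insertBy]

-- Head of B's sorted candidate list = first-maximum fold over the candidates.
lemma head_sorted_eq_foldl (cand : List (String × Int)) :
    (PySem.List.sorted cand (fun kc => -kc.2) false).head? = cand.foldl pvStepM none := by
  rw [PySem.List.sorted_eq_foldl_insertBy]
  exact head_foldl_insertBy cand []

-- ===== VERDICT (by name: the statement is the Claim_ definition above) =====
theorem find_implicit_command_spec : Claim_equal_find_implicit_command := by
  intro amount cfg _ _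
  unfold Spec_find_implicit_command find_implicit_command find_implicit_command_alt
  have h := pvLoop_inv amount cfg (0, none) none (Or.inl ⟨rfl, rfl⟩)
  have hh := head_sorted_eq_foldl
    ((cfg.filter
        (fun kv => decide (pvExpl kv.2 = 0 ∧ 0 < pvCost kv.2 ∧ pvCost kv.2 ≤ amount))).map
      (fun kv => (kv.1, pvCost kv.2)))
  rcases h with ⟨hm, hs⟩ | ⟨k, c, hm, hs, _⟩ <;>
    rw [hm] at hh <;> rw [hs] <;>
    cases hsort : PySem.List.sorted
      ((cfg.filter
          (fun kv => decide (pvExpl kv.2 = 0 ∧ 0 < pvCost kv.2 ∧ pvCost kv.2 ≤ amount))).map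
        (fun kv => (kv.1, pvCost kv.2)))
      (fun kc => -kc.2) false <;>
    rw [hsort] at hh <;> simp_all
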